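-- pv_equiv track=rewrite | github.com/zooniverse/aggregation | experimental/serenegti/IAAI/nodes.py | map2
-- ===== SOURCE A (Python) =====
-- from itertools import chain, combinations
--
-- def powerset(s):
--     "powerset([1,2,3]) --> () (1,) (2,) (3,) (1,2) (1,3) (2,3) (1,2,3)"
--     return list(chain.from_iterable(combinations(s, r) for r in range(len(s)+1)))
--
-- def map2(classification,speciesFilter):
--     for gIndex, group in enumerate(powerset(speciesFilter)):
--         g_complement = [s for s in speciesFilter if not(s in group)]
--
--         if not(set(classification).intersection(group) == set(group)):
--             pass
--         elif not(set(classification).intersection(g_complement) == set()):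
--             pass
--         else:
--             return gIndex
--
--     assert(False)
-- ===== SOURCE B (Python) =====
-- def _choose(n, k):
--     # binomial coefficient via Pascal's triangle (addition only)
--     if k < 0 or k > n:
--         return 0
--     row = [1]
--     for _ in range(n):
--         row = [1] + [row[i] + row[i + 1] for i in range(len(row) - 1)] + [1]
--     return row[k]
--
-- def map2(classification, speciesFilter):
--     # The group A finds is the set of speciesFilter values present in
--     # classification; its index combinations are the first occurrences.
--     # Compute that subset directly, then its rank in the powerset ordering.
--     cls = set(classification)
--     target = []
--     for s in speciesFilter:
--         if s in cls and s not in target: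
--             target.append(s)
--     n = len(speciesFilter)
--     k = len(target)
--     index = sum(_choose(n, r) for r in range(k))
--     j = 0
--     for i, s in enumerate(speciesFilter):
--         if j < k and s == target[j]:
--             j += 1
--         elif j < k:
--             index += _choose(n - 1 - i, k - 1 - j)
--     return index
-- ===== Notes on version B (the rewrite author's own statement) =====
-- stated objective: faster
-- what changed: Instead of enumerating the whole powerset of speciesFilter and testing each group with set intersections, B computes the unique matching subset (first occurrences of speciesFilter values present in classification) directly and returns its combinatorial rank in the powerset enumeration using binomial coefficients from Pascal's triangle.
import Mathlib
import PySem

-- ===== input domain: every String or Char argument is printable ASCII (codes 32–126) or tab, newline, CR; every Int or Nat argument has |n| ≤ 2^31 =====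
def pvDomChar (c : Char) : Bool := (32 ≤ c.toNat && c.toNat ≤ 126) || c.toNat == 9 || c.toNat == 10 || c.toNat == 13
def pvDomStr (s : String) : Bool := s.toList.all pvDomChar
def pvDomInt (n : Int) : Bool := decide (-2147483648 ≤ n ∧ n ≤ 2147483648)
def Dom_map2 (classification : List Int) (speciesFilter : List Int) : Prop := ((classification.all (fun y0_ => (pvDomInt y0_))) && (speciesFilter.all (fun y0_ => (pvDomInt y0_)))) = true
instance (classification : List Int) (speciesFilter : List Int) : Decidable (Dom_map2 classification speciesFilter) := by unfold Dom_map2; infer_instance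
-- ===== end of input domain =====

-- B replaces A's scan of the whole powerset by computing the matching subset directly and
-- ranking it combinatorially (objective: faster). Equivalence of return values is proved below.

-- ===== PORT A =====
-- itertools.combinations(s, r), in itertools order (tuples as lists)
def pyCombos : List Int → Nat → List (List Int)
  | _, 0 => [[]]
  | [], _ + 1 => []
  | x :: xs, r + 1 => ((pyCombos xs r).map (fun g => x :: g)) ++ pyCombos xs (r + 1)

-- powerset(s) = chain.from_iterable(combinations(s, r) for r in range(len(s)+1))
def pyPowerset (s : List Int) : List (List Int) :=
  ((List.range (s.length + 1)).map (fun r => pyCombos s r)).flatten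

-- the `for gIndex, group in enumerate(powerset(...))` loop with its early return
def map2Loop (classification speciesFilter : List Int) : List (Int × List Int) → Option Int
  | [] => none
  | (gIndex, group) :: rest =>
    let g_complement := speciesFilter.filter (fun s => !(group.contains s))
    if !(PySem.Set.equal (PySem.Set.inter (PySem.Set.ofList classification) group) (PySem.Set.ofList group)) then
      map2Loop classification speciesFilter rest
    else if !(PySem.Set.equal (PySem.Set.inter (PySem.Set.ofList classification) g_complement) PySem.Set.empty) then
      map2Loop classification speciesFilter rest
    else some gIndex

def map2 (classification : List Int) (speciesFilter : List Int) : Int :=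
  -- `.getD 0` covers the `assert False` fall-through, which is unreachable (a matching
  -- group always exists in the powerset; the equivalence proof below establishes this)
  (map2Loop classification speciesFilter (PySem.List.enumerate (pyPowerset speciesFilter) 0)).getD 0

-- ===== PORT B =====
-- _pascal(n): row n of Pascal's triangle (all values are nonnegative ints, so Nat is exact)
def pvPascalRow : Nat → List Nat
  | 0 => [1]
  | n + 1 =>
    let prev := pvPascalRow n
    [1] ++ (List.zipWith (fun a b => a + b) prev (prev.drop 1)) ++ [1]

-- _choose(n, k); Python's `k < 0` test is vacuous over Nat, `row[k]` is in range when k ≤ n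
def pvChoose (n k : Nat) : Nat :=
  if k > n then 0 else (pvPascalRow n).getD k 0

-- the `for i, s in enumerate(speciesFilter)` ranking loop of Source B, state (i, j, index)
def pvRankLoop (n : Nat) (target : List Int) (k : Nat) : List Int → Nat → Nat → Nat → Nat
  | [], _, _, index => index
  | s :: rest, i, j, index =>
    if j < k && (target.getD j 0 == s) then
      pvRankLoop n target k rest (i + 1) (j + 1) index
    else if j < k then
      pvRankLoop n target k rest (i + 1) j (index + pvChoose (n - 1 - i) (k - 1 - j))
    else
      pvRankLoop n target k rest (i + 1) j index

def map2_alt (classification : List Int) (speciesFilter : List Int) : Int :=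
  let cls : PySem.Set Int := PySem.Set.ofList classification
  let target := speciesFilter.foldl
    (fun t s => if PySem.Set.contains cls s && !(t.contains s) then t ++ [s] else t) []
  let n := speciesFilter.length
  let k := target.length
  let index := ((List.range k).map (fun r => pvChoose n r)).sum
  Int.ofNat (pvRankLoop n target k speciesFilter 0 0 index)

-- ===== PRECONDITION & SPEC =====
def Spec_map2 (classification : List Int) (speciesFilter : List Int) (out : Int) : Prop := out = map2_alt classification speciesFilter
instance (classification : List Int) (speciesFilter : List Int) (out : Int) : Decidable (Spec_map2 classification speciesFilter out) := by unfold Spec_map2; infer_instance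

-- ===== CLAIM (what is proved, stated in full; the proofs are below) =====
def Claim_equal_map2 : Prop := ∀ (classification : List Int) (speciesFilter : List Int), Dom_map2 classification speciesFilter → Spec_map2 classification speciesFilter (map2 classification speciesFilter)

-- ===== LEMMAS AND PROOFS =====

-- the group A searches for, relative to a set `seen` of already-picked values:
-- first occurrences in s of values of cls not in seen
def pvTgt (cls : List Int) : List Int → List Int → List Int
  | _, [] => []
  | seen, x :: xs => if x ∈ cls ∧ x ∉ seen then x :: pvTgt cls (x :: seen) xs else pvTgt cls seen xs

-- the predicate A's two set tests amount to, as a Bool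
def pvP (cls t g : List Int) : Bool :=
  g.all (fun a => cls.contains a) && t.all (fun v => g.contains v)

-- clean form of B's ranking loop
def pvRkc : List Int → List Int → Nat
  | _, [] => 0
  | [], _ :: _ => 0
  | x :: xs, v :: t' =>
    if x = v then pvRkc xs t' else Nat.choose xs.length t'.length + pvRkc xs (v :: t')

theorem length_pyCombos (s : List Int) (r : Nat) : (pyCombos s r).length = s.length.choose r := by
  induction s generalizing r with
  | nil => cases r <;> simp [pyCombos]
  | cons x xs ih =>
    cases r with
    | zero => simp [pyCombos]
    | succ r => simp [pyCombos, ih, Nat.choose_succ_succ]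

theorem length_of_mem_pyCombos {s : List Int} {r : Nat} {g : List Int} (h : g ∈ pyCombos s r) :
    g.length = r := by
  induction s generalizing r g with
  | nil =>
    cases r with
    | zero => simp [pyCombos] at h; simp [h]
    | succ r => simp [pyCombos] at h
  | cons x xs ih =>
    cases r with
    | zero => simp [pyCombos] at h; simp [h]
    | succ r =>
      simp only [pyCombos, List.mem_append, List.mem_map] at h
      rcases h with ⟨g', hg', rfl⟩ | h
      · simp [ih hg']
      · exact ih h

theorem mem_pvTgt {cls seen s : List Int} {v : Int} :
    v ∈ pvTgt cls seen s ↔ v ∈ s ∧ v ∈ cls ∧ v ∉ seen := by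
  induction s generalizing seen with
  | nil => simp [pvTgt]
  | cons x xs ih =>
    by_cases hx : x ∈ cls ∧ x ∉ seen
    · simp only [pvTgt, if_pos hx, List.mem_cons, ih]
      constructor
      · rintro (rfl | ⟨h1, h2, h3⟩)
        · exact ⟨Or.inl rfl, hx.1, hx.2⟩
        · exact ⟨Or.inr h1, h2, fun hs => h3 (Or.inr hs)⟩
      · rintro ⟨rfl | h1, h2, h3⟩
        · exact Or.inl rfl
        · by_cases hvx : v = x
          · exact Or.inl hvx
          · exact Or.inr ⟨h1, h2, by simp [hvx, h3]⟩
    · simp only [pvTgt, if_neg hx, List.mem_cons, ih]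
      constructor
      · rintro ⟨h1, h2, h3⟩; exact ⟨Or.inr h1, h2, h3⟩
      · rintro ⟨rfl | h1, h2, h3⟩
        · exact absurd ⟨h2, h3⟩ hx
        · exact ⟨h1, h2, h3⟩

theorem nodup_pvTgt (cls seen s : List Int) : (pvTgt cls seen s).Nodup := by
  induction s generalizing seen with
  | nil => simp [pvTgt]
  | cons x xs ih =>
    by_cases hx : x ∈ cls ∧ x ∉ seen
    · simp only [pvTgt, if_pos hx]
      refine List.nodup_cons.mpr ⟨fun hmem => ?_, ih _⟩
      exact (mem_pvTgt.mp hmem).2.2 (List.mem_cons_self)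
    · simpa only [pvTgt, if_neg hx] using ih seen

theorem pvTgt_congr {cls seen₁ seen₂ : List Int} (s : List Int)
    (h : ∀ a, a ∈ seen₁ ↔ a ∈ seen₂) : pvTgt cls seen₁ s = pvTgt cls seen₂ s := by
  induction s generalizing seen₁ seen₂ with
  | nil => rfl
  | cons x xs ih =>
    by_cases hx : x ∈ cls ∧ x ∉ seen₁
    · have hx₂ : x ∈ cls ∧ x ∉ seen₂ := ⟨hx.1, fun hm => hx.2 ((h x).mpr hm)⟩
      simp only [pvTgt, if_pos hx, if_pos hx₂]
      exact congrArg _ (ih (by intro a; simp [List.mem_cons, h a]))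
    · have hx₂ : ¬(x ∈ cls ∧ x ∉ seen₂) := by
        intro hc; exact hx ⟨hc.1, fun hm => hc.2 ((h x).mp hm)⟩
      simp only [pvTgt, if_neg hx, if_neg hx₂]
      exact ih h

theorem length_pvPascalRow (n : Nat) : (pvPascalRow n).length = n + 1 := by
  induction n with
  | zero => rfl
  | succ n ih => simp [pvPascalRow, ih]

theorem pascalRow_getElem? (n k : Nat) :
    (pvPascalRow n)[k]? = if k ≤ n then some (n.choose k) else none := by
  induction n generalizing k with
  | zero =>
    cases k with
    | zero => rfl
    | succ k => simp [pvPascalRow]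
  | succ n ih =>
    have hlen : (pvPascalRow n).length = n + 1 := length_pvPascalRow n
    have hzlen : (List.zipWith (fun a b => a + b) (pvPascalRow n) ((pvPascalRow n).drop 1)).length = n := by
      simp [List.length_zipWith, hlen]
    cases k with
    | zero => simp [pvPascalRow]
    | succ j =>
      show ((1 :: (List.zipWith (fun a b => a + b) (pvPascalRow n) ((pvPascalRow n).drop 1) ++ [1])))[j+1]? = _
      rw [List.getElem?_cons_succ]
      rcases lt_trichotomy j n with hj | rfl | hj
      · rw [List.getElem?_append_left (by omega)]
        have h1 : (pvPascalRow n)[j]? = some (n.choose j) := by simp [ih, Nat.le_of_lt hj]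
        have h2 : (pvPascalRow n)[j+1]? = some (n.choose (j+1)) := by simp [ih, hj]
        have hjz : j < (List.zipWith (fun a b => a + b) (pvPascalRow n) ((pvPascalRow n).drop 1)).length := by omega
        rw [List.getElem?_eq_getElem hjz, List.getElem_zipWith]
        have e1 : (pvPascalRow n)[j]'(by omega) = n.choose j := by
          have := List.getElem?_eq_getElem (l := pvPascalRow n) (i := j) (by omega)
          rw [h1] at this; exact (Option.some.injEq _ _).mp this.symm
        have h2' : (pvPascalRow n)[1 + j]? = some (n.choose (j + 1)) := by
          rw [show 1 + j = j + 1 from by omega]; exact h2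
        have e2 : ((pvPascalRow n).drop 1)[j]'(by simp [hlen]; omega) = n.choose (j+1) := by
          rw [List.getElem_drop]
          have := List.getElem?_eq_getElem (l := pvPascalRow n) (i := 1 + j) (by omega)
          rw [h2'] at this
          exact (Option.some.injEq _ _).mp this.symm
        simp only [e1, e2]
        have : j + 1 ≤ n + 1 := by omega
        simp [this, Nat.choose_succ_succ]
      · rw [List.getElem?_append_right (by omega), hzlen]
        simp [Nat.choose_self]
      · rw [List.getElem?_append_right (by omega), hzlen]
        have hle : ¬ (j + 1 ≤ n + 1) := by omega
        simp only [hle, if_false]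
        apply List.getElem?_eq_none
        simp only [List.length_cons, List.length_nil]
        omega

theorem pascalRow_getD (n k : Nat) : (pvPascalRow n).getD k 0 = n.choose k := by
  rw [List.getD_eq_getElem?_getD, pascalRow_getElem?]
  by_cases h : k ≤ n
  · simp [h]
  · simp only [h, if_false, Option.getD_none]
    exact (Nat.choose_eq_zero_of_lt (by omega)).symm

theorem pvChoose_eq (n k : Nat) : pvChoose n k = n.choose k := by
  unfold pvChoose
  by_cases h : k > n
  · simp only [h, if_true]
    exact (Nat.choose_eq_zero_of_lt h).symm
  · simp only [h, if_false]
    exact pascalRow_getD n k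

theorem nodup_subset_length {t g : List Int} (h : t.Nodup) (hsub : ∀ v ∈ t, v ∈ g) :
    t.length ≤ g.length :=
  calc t.length = t.toFinset.card := (List.toFinset_card_of_nodup h).symm
    _ ≤ g.toFinset.card := Finset.card_le_card (fun a ha => by
        simp only [List.mem_toFinset] at ha ⊢; exact hsub a ha)
    _ ≤ g.length := g.toFinset_card_le

theorem findIdx?_congr_mem {α : Type} {p q : α → Bool} :
    ∀ {l : List α}, (∀ a ∈ l, p a = q a) → List.findIdx? p l = List.findIdx? q l := by
  intro l
  induction l with
  | nil => intro _; rfl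
  | cons x xs ih =>
    intro h
    rw [List.findIdx?_cons, List.findIdx?_cons, h x List.mem_cons_self,
        ih (fun a ha => h a (List.mem_cons_of_mem _ ha))]

-- CENTRAL LEMMA: within the block of size-|t| combinations, the first match sits at pvRkc s t
theorem central (cls : List Int) : ∀ (s seen : List Int),
    List.findIdx? (pvP cls (pvTgt cls seen s)) (pyCombos s (pvTgt cls seen s).length)
      = some (pvRkc s (pvTgt cls seen s)) := by
  intro s
  induction s with
  | nil => intro seen; simp [pvTgt, pyCombos, pvP, pvRkc, List.findIdx?_cons]
  | cons x xs ih =>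
    intro seen
    by_cases hx : x ∈ cls ∧ x ∉ seen
    · have htgt : pvTgt cls seen (x :: xs) = x :: pvTgt cls (x :: seen) xs := by
        simp [pvTgt, hx]
      rw [htgt]
      have hpoint : ∀ g, pvP cls (x :: pvTgt cls (x :: seen) xs) (x :: g)
          = pvP cls (pvTgt cls (x :: seen) xs) g := by
        intro g
        apply Bool.eq_iff_iff.mpr
        simp only [pvP, Bool.and_eq_true, List.all_eq_true, List.contains_iff_mem,
          List.mem_cons]
        constructor
        · rintro ⟨h1, h2⟩
          refine ⟨fun a ha => h1 a (Or.inr ha), fun v hv => ?_⟩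
          rcases h2 v (Or.inr hv) with rfl | hg
          · exact absurd List.mem_cons_self (mem_pvTgt.mp hv).2.2
          · exact hg
        · rintro ⟨h1, h2⟩
          refine ⟨fun a ha => ?_, fun v hv => ?_⟩
          · rcases ha with rfl | ha
            · exact hx.1
            · exact h1 a ha
          · rcases hv with rfl | hv
            · exact Or.inl rfl
            · exact Or.inr (h2 v hv)
      simp only [List.length_cons, pyCombos]
      rw [List.findIdx?_append, List.findIdx?_map]
      have hmap : List.findIdx? (pvP cls (x :: pvTgt cls (x :: seen) xs) ∘ (fun g => x :: g))
          (pyCombos xs (pvTgt cls (x :: seen) xs).length)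
          = some (pvRkc xs (pvTgt cls (x :: seen) xs)) := by
        exact (findIdx?_congr_mem (fun g _ => hpoint g)).trans (ih (x :: seen))
      rw [hmap]
      simp [pvRkc]
    · have htgt : pvTgt cls seen (x :: xs) = pvTgt cls seen xs := by
        simp [pvTgt, hx]
      rw [htgt]
      have ih' := ih seen
      rcases hts : pvTgt cls seen xs with _ | ⟨v, t'⟩
      · simp [pyCombos, pvP, pvRkc, List.findIdx?_cons]
      · rw [hts] at ih'
        simp only [List.length_cons] at ih'
        have hxcls : x ∉ cls ∨ x ∈ seen := by
          by_cases hc : x ∈ cls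
          · right; by_contra hs; exact hx ⟨hc, hs⟩
          · left; exact hc
        have hxnt : x ∉ (v :: t') := by
          intro hmem
          have := mem_pvTgt.mp (hts ▸ hmem)
          rcases hxcls with hc | hs
          · exact hc this.2.1
          · exact this.2.2 hs
        simp only [List.length_cons, pyCombos]
        rw [List.findIdx?_append, List.findIdx?_map]
        have hnone : List.findIdx? (pvP cls (v :: t') ∘ (fun g => x :: g))
            (pyCombos xs t'.length) = none := by
          apply List.findIdx?_eq_none_iff.mpr
          intro g hg
          show pvP cls (v :: t') (x :: g) = false
          by_contra hb
          have htrue : pvP cls (v :: t') (x :: g) = true := by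
            cases h : pvP cls (v :: t') (x :: g)
            · exact absurd h hb
            · rfl
          simp only [pvP, Bool.and_eq_true, List.all_eq_true, List.contains_iff_mem] at htrue
          obtain ⟨h1, h2⟩ := htrue
          rcases hxcls with hc | _
          · exact hc (h1 x List.mem_cons_self)
          · have hsub : ∀ u ∈ (v :: t'), u ∈ g := by
              intro u hu
              rcases List.mem_cons.mp (h2 u hu) with rfl | hug
              · exact absurd hu hxnt
              · exact hug
            have hnd : (v :: t').Nodup := hts ▸ nodup_pvTgt cls seen xs
            have := nodup_subset_length hnd hsub
            have hlg := length_of_mem_pyCombos hg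
            simp [hlg] at this
        rw [hnone, ih']
        have hxv : x ≠ v := by
          intro rfl_eq
          exact hxnt (rfl_eq ▸ List.mem_cons_self)
        simp only [Option.map_some, Option.none_or, List.length_map, length_pyCombos]
        show _ = some (pvRkc (x :: xs) (v :: t'))
        simp only [pvRkc, if_neg hxv]
        exact congrArg some (Nat.add_comm _ _)

-- no group shorter than |t| can match
theorem no_match_short {cls t g : List Int} (hnd : t.Nodup) (hlt : g.length < t.length) :
    pvP cls t g = false := by
  cases h : pvP cls t g
  · rfl
  · exfalso
    simp only [pvP, Bool.and_eq_true, List.all_eq_true, List.contains_iff_mem] at h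
    have := nodup_subset_length hnd h.2
    omega

-- first match over the whole powerset
theorem findIdx_powerset (cls s : List Int) :
    List.findIdx? (pvP cls (pvTgt cls [] s)) (pyPowerset s)
      = some ((((List.range (pvTgt cls [] s).length).map (fun r => (pyCombos s r).length)).sum)
              + pvRkc s (pvTgt cls [] s)) := by
  have hnd : (pvTgt cls [] s).Nodup := nodup_pvTgt cls [] s
  have hsub : ∀ v ∈ pvTgt cls [] s, v ∈ s := fun v hv => (mem_pvTgt.mp hv).1
  have hk : (pvTgt cls [] s).length ≤ s.length := nodup_subset_length hnd hsub
  -- split range (|s|+1) = range k ++ shifted rest, rest nonempty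
  obtain ⟨m, hm⟩ : ∃ m, s.length + 1 = (pvTgt cls [] s).length + (m + 1) := ⟨s.length - (pvTgt cls [] s).length, by omega⟩
  unfold pyPowerset
  rw [hm, List.range_add, List.range_succ_eq_map]
  simp only [List.map_append, List.flatten_append, List.map_cons, List.flatten_cons]
  rw [List.findIdx?_append]
  have hfirst : List.findIdx? (pvP cls (pvTgt cls [] s))
      ((List.map (fun r => pyCombos s r) (List.range (pvTgt cls [] s).length)).flatten) = none := by
    apply List.findIdx?_eq_none_iff.mpr
    intro g hg
    rw [List.mem_flatten] at hg
    obtain ⟨l, hl, hgl⟩ := hg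
    rw [List.mem_map] at hl
    obtain ⟨r, hr, rfl⟩ := hl
    rw [List.mem_range] at hr
    exact no_match_short hnd (by rw [length_of_mem_pyCombos hgl]; exact hr)
  rw [hfirst]
  rw [List.findIdx?_append]
  have hadd0 : (pvTgt cls [] s).length + 0 = (pvTgt cls [] s).length := rfl
  rw [hadd0, central cls s []]
  simp only [Option.none_or, Option.some_or, Option.map_some, List.length_flatten,
    List.map_map]
  refine congrArg some ?_
  have hcomp : (List.length ∘ fun r => pyCombos s r) = fun r => (pyCombos s r).length := rfl
  rw [hcomp]
  exact Nat.add_comm _ _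

-- A's two set tests equal pvP
theorem predA_eq (cls sf g : List Int) :
    (PySem.Set.equal (PySem.Set.inter (PySem.Set.ofList cls) g) (PySem.Set.ofList g)
      && PySem.Set.equal (PySem.Set.inter (PySem.Set.ofList cls)
            (sf.filter (fun s => !(g.contains s)))) PySem.Set.empty)
      = pvP cls (pvTgt cls [] sf) g := by
  apply Bool.eq_iff_iff.mpr
  simp only [Bool.and_eq_true, PySem.Set.equal_iff, PySem.Set.mem_inter, PySem.Set.mem_ofList,
    List.mem_filter, pvP, List.all_eq_true, mem_pvTgt,
    List.not_mem_nil, Bool.not_eq_true', List.contains_eq_mem, decide_eq_false_iff_not,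
    PySem.Set.empty, iff_false, not_false_iff, and_true, decide_eq_true_eq]
  constructor
  · rintro ⟨h1, h2⟩
    constructor
    · intro a ha; exact ((h1 a).mpr ha).1
    · intro v hv
      by_contra hg
      exact (h2 v) ⟨hv.2, hv.1, hg⟩
  · rintro ⟨h1, h2⟩
    constructor
    · intro a
      constructor
      · rintro ⟨_, hag⟩; exact hag
      · intro hag; exact ⟨h1 a hag, hag⟩
    · rintro a ⟨hacls, hasf, hang⟩
      exact hang (h2 a ⟨hasf, hacls⟩)

-- A's loop is findIdx? of that predicate
theorem map2Loop_eq (cls sf : List Int) : ∀ (L : List (List Int)) (s : Int),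
    map2Loop cls sf (PySem.List.enumerate L s)
      = (List.findIdx? (pvP cls (pvTgt cls [] sf)) L).map (fun i => s + (i : Int)) := by
  intro L
  induction L with
  | nil => intro s; simp [map2Loop, PySem.List.enumerate]
  | cons g L ih =>
    intro s
    rw [PySem.List.enumerate_cons, List.findIdx?_cons]
    have hp := predA_eq cls sf g
    by_cases hc1 : PySem.Set.equal (PySem.Set.inter (PySem.Set.ofList cls) g)
        (PySem.Set.ofList g) = true
    · by_cases hc2 : PySem.Set.equal (PySem.Set.inter (PySem.Set.ofList cls)
          (sf.filter (fun a => !(g.contains a)))) PySem.Set.empty = true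
      · have hptrue : pvP cls (pvTgt cls [] sf) g = true := by rw [← hp, hc1, hc2]; rfl
        have hc2' : ((PySem.Set.ofList cls).inter
            (List.filter (fun s => !g.contains s) sf)).equal [] = true := hc2
        simp [map2Loop, hc1, hc2', hptrue, -List.contains_eq_mem]
      · have hpfalse : pvP cls (pvTgt cls [] sf) g = false := by
          rw [← hp, hc1, Bool.true_and]; exact Bool.eq_false_iff.mpr hc2
        simp only [map2Loop, hc1, hc2, Bool.not_true, Bool.not_false, if_true,
          hpfalse, ih (s + 1)]
        cases List.findIdx? (pvP cls (pvTgt cls [] sf)) L with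
        | none => simp
        | some k => simp; ring
    · have hpfalse : pvP cls (pvTgt cls [] sf) g = false := by
        rw [← hp]; exact Bool.and_eq_false_iff.mpr (Or.inl (Bool.eq_false_iff.mpr hc1))
      simp only [map2Loop, hc1, Bool.not_false, if_true, hpfalse, ih (s + 1)]
      cases List.findIdx? (pvP cls (pvTgt cls [] sf)) L with
      | none => simp
      | some k => simp; ring

-- B's target foldl computes pvTgt
theorem foldl_target (cls : List Int) : ∀ (s t : List Int),
    s.foldl (fun t x => if PySem.Set.contains (PySem.Set.ofList cls) x && !(t.contains x)
                        then t ++ [x] else t) t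
      = t ++ pvTgt cls t s := by
  intro s
  induction s with
  | nil => intro t; simp [pvTgt]
  | cons x xs ih =>
    intro t
    simp only [List.foldl_cons]
    by_cases hc : x ∈ cls ∧ x ∉ t
    · have hcond : (PySem.Set.contains (PySem.Set.ofList cls) x && !(t.contains x)) = true := by
        simp only [Bool.and_eq_true, PySem.Set.contains_iff, PySem.Set.mem_ofList,
          Bool.not_eq_true', List.contains_eq_mem, decide_eq_false_iff_not]
        exact hc
      rw [hcond]
      simp only [if_true]
      rw [ih (t ++ [x])]
      have hseen : pvTgt cls (t ++ [x]) xs = pvTgt cls (x :: t) xs :=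
        pvTgt_congr xs (by intro a; simp [List.mem_append, List.mem_cons, or_comm])
      simp only [pvTgt, if_pos hc, hseen]
      simp only [List.append_assoc, List.singleton_append]
    · have hcond : (PySem.Set.contains (PySem.Set.ofList cls) x && !(t.contains x)) = false := by
        rw [Bool.and_eq_false_iff]
        by_cases hx : x ∈ cls
        · right
          have : x ∈ t := by by_contra hnt; exact hc ⟨hx, hnt⟩
          simp [this]
        · left
          simp only [PySem.Set.contains_eq_listContains]
          simp [hx]
      rw [hcond]
      simp only [Bool.false_eq_true, if_false]
      rw [ih t]
      simp only [pvTgt, if_neg hc]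

-- B's ranking loop computes pvRkc
theorem rankLoop_eq (target : List Int) (n : Nat) : ∀ (rest : List Int) (i j index : Nat),
    i + rest.length = n → j ≤ target.length →
    pvRankLoop n target target.length rest i j index = index + pvRkc rest (target.drop j) := by
  intro rest
  induction rest with
  | nil =>
    intro i j index _ _
    rcases target.drop j with _ | ⟨v, t⟩ <;> simp [pvRankLoop, pvRkc]
  | cons x xs ih =>
    intro i j index hn hj
    by_cases hjk : j < target.length
    · have hdrop : target.drop j = target[j] :: target.drop (j + 1) :=
        List.drop_eq_getElem_cons hjk
      have hgd : target[j]?.getD 0 = target[j] := by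
        rw [List.getElem?_eq_getElem hjk]; rfl
      by_cases hx : target[j] = x
      · have hcond : (decide (j < target.length) && (target.getD j 0 == x)) = true := by
          simp [hjk, hx]
        simp only [pvRankLoop, hcond, if_true]
        rw [ih (i + 1) (j + 1) index (by simp only [List.length_cons] at hn; omega) (by omega)]
        rw [hdrop]
        simp [pvRkc, hx]
      · have hcond : (decide (j < target.length) && (target.getD j 0 == x)) = false := by
          simp [hgd]
          intro _; exact hx
        simp only [pvRankLoop, hcond, Bool.false_eq_true, if_false, if_pos hjk]
        rw [ih (i + 1) j _ (by simp only [List.length_cons] at hn; omega) (by omega)]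
        rw [hdrop]
        have hxv : ¬ (x = target[j]) := fun e => hx e.symm
        simp only [pvRkc, if_neg hxv]
        have hch : pvChoose (n - 1 - i) (target.length - 1 - j)
            = xs.length.choose (target.drop (j + 1)).length := by
          rw [pvChoose_eq, List.length_drop]
          have hn' : n - 1 - i = xs.length := by simp only [List.length_cons] at hn; omega
          have : target.length - 1 - j = target.length - (j + 1) := by omega
          rw [hn', this]
        rw [hch]
        omega
    · have hcond : (decide (j < target.length) && (target.getD j 0 == x)) = false := by
        simp [hjk]
      simp only [pvRankLoop, hcond, Bool.false_eq_true, if_false, if_neg hjk]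
      have hdrop : target.drop j = [] := List.drop_eq_nil_of_le (by omega)
      rw [ih (i + 1) j index (by simp only [List.length_cons] at hn; omega) hj, hdrop]
      simp [pvRkc]

-- ===== VERDICT (by name: the statement is the Claim_ definition above) =====
theorem map2_spec : Claim_equal_map2 := by
  intro cls sf _
  unfold Spec_map2
  show (map2Loop cls sf (PySem.List.enumerate (pyPowerset sf) 0)).getD 0 = _
  rw [map2Loop_eq cls sf (pyPowerset sf) 0, findIdx_powerset]
  show (0 : Int) + _ = _
  rw [zero_add]
  unfold map2_alt
  simp only []
  rw [foldl_target cls sf []]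
  simp only [List.nil_append]
  rw [rankLoop_eq (pvTgt cls [] sf) sf.length sf 0 0 _ (by simp) (Nat.zero_le _)]
  rw [List.drop_zero]
  have hsum : ((List.range (pvTgt cls [] sf).length).map
      (fun r => pvChoose sf.length r)).sum
      = ((List.range (pvTgt cls [] sf).length).map (fun r => (pyCombos sf r).length)).sum := by
    apply congrArg
    apply List.map_congr_left
    intro r _
    rw [pvChoose_eq, length_pyCombos]
  rw [hsum]
  simp only [Int.ofNat_eq_natCast, Nat.cast_add, Nat.cast_list_sum, List.map_map]
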